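-- pv_equiv track=rewrite | github.com/Tejaswini2212/UMBC-DATA606-Capstone | notebooks/chatbot_helpers.py | normalize_sql
-- ===== SOURCE A (Python) =====
-- def normalize_sql(sql: str) -> str:
--     """
--     Small cleanup to fix common LLM mistakes with column names.
--     """
--     replacements = {
--         '"Description"': 'description',
--         '"Vendor"': 'vendor',
--         '"Category"': 'category',
--     }
--     fixed = sql
--     for bad, good in replacements.items():
--         fixed = fixed.replace(bad, good)
--     return fixed
-- ===== SOURCE B (Python) =====
-- def normalize_sql(sql: str) -> str:
--     """
--     Small cleanup to fix common LLM mistakes with column names.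
--     Single left-to-right scan: at each '"' try the quoted column names and
--     emit the replacement for the first match, instead of three full
--     str.replace passes over the string.
--     """
--     fixes = (
--         ('"Description"', 'description'),
--         ('"Vendor"', 'vendor'),
--         ('"Category"', 'category'),
--     )
--     pieces = []
--     i = 0
--     n = len(sql)
--     while i < n:
--         ch = sql[i]
--         if ch == '"':
--             for quoted, plain in fixes:
--                 if sql.startswith(quoted, i):
--                     pieces.append(plain)
--                     i += len(quoted)
--                     break
--             else:
--                 pieces.append(ch)
--                 i += 1
--         else:
--             pieces.append(ch)
--             i += 1
--     return ''.join(pieces)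
-- ===== Notes on version B (the rewrite author's own statement) =====
-- stated objective: alternative
-- what changed: B makes one left-to-right scan over the string, trying the three quoted column names at each double-quote character and emitting the replacement at the first match, instead of A's three sequential full str.replace passes.
-- outside the precondition, e.g. on normalize_sql('"Vendor"Description"'): A returns '"Vendordescription', B returns 'vendorDescription"'
import Mathlib
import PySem

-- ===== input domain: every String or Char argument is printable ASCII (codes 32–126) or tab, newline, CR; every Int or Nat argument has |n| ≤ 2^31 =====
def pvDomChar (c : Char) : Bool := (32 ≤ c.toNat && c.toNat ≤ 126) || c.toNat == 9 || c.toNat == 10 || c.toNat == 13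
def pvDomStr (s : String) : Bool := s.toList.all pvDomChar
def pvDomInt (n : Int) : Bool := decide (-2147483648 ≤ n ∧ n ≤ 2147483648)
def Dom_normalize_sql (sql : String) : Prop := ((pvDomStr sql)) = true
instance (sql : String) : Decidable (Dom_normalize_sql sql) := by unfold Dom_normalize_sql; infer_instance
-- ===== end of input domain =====

-- B replaces A's three sequential str.replace passes by one left-to-right scan with an
-- alternation of the three quoted names (objective: alternative, one pass instead of three).

-- ===== PORT A =====
def normalize_sql (sql : String) : String :=
  -- dict of replacements → association list in insertion order; the for-loop → foldl
  let replacements : List (String × String) :=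
    [("\"Description\"", "description"), ("\"Vendor\"", "vendor"), ("\"Category\"", "category")]
  replacements.foldl (fun fixed bg => PySem.Str.replace fixed bg.1 bg.2) sql

-- ===== PORT B =====
-- Source B's while-loop over positions: structural recursion on the remaining characters;
-- at a double-quote it tries the three quoted names in mapping order and jumps past the
-- first match.
def pvAltGo : List Char → List Char
  | [] => []
  | c :: t =>
    if c = '"' then
      if ("\"Description\"".toList).isPrefixOf (c :: t) then
        "description".toList ++ pvAltGo (t.drop 12)
      else if ("\"Vendor\"".toList).isPrefixOf (c :: t) then
        "vendor".toList ++ pvAltGo (t.drop 7)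
      else if ("\"Category\"".toList).isPrefixOf (c :: t) then
        "category".toList ++ pvAltGo (t.drop 9)
      else c :: pvAltGo t
    else c :: pvAltGo t
  termination_by l => l.length
  decreasing_by all_goals (simp; try omega)

def normalize_sql_alt (sql : String) : String := String.ofList (pvAltGo sql.toList)

-- ===== PRECONDITION & SPEC =====
-- Pre_ excludes strings in which two occurrences of the quoted column names overlap on a
-- shared double-quote character (i.e. the string contains one of the three concatenations
-- listed below): there A's fixed pass order keeps the later occurrence of the earlier dict
-- key while B's single scan keeps the leftmost occurrence — both results are defensible
-- readings of an unspecified corner.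
def pvBad : List String := ["\"Vendor\"Description\"", "\"Category\"Description\"", "\"Category\"Vendor\""]

def Pre_normalize_sql (sql : String) : Prop := ∀ b ∈ pvBad, PySem.Str.isIn b sql = false
instance (sql : String) : Decidable (Pre_normalize_sql sql) := by unfold Pre_normalize_sql; infer_instance

def pvWitness_normalize_sql : String :=
  "SELECT \"Vendor\", SUM(amount) FROM expenses WHERE \"Description\" LIKE '%tax%'"

def Spec_normalize_sql (sql : String) (out : String) : Prop := out = normalize_sql_alt sql
instance (sql : String) (out : String) : Decidable (Spec_normalize_sql sql out) := by unfold Spec_normalize_sql; infer_instance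

-- ===== CLAIM (what is proved, stated in full; the proofs are below) =====
def Claim_equal_normalize_sql : Prop := ∀ (sql : String), Dom_normalize_sql sql → Pre_normalize_sql sql → Spec_normalize_sql sql (normalize_sql sql)

-- ===== LEMMAS AND PROOFS =====

-- the three patterns and replacements as explicit character lists
abbrev pvP1 : List Char := ['"', 'D', 'e', 's', 'c', 'r', 'i', 'p', 't', 'i', 'o', 'n', '"']
abbrev pvR1 : List Char := ['d', 'e', 's', 'c', 'r', 'i', 'p', 't', 'i', 'o', 'n']
abbrev pvP2 : List Char := ['"', 'V', 'e', 'n', 'd', 'o', 'r', '"']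
abbrev pvR2 : List Char := ['v', 'e', 'n', 'd', 'o', 'r']
abbrev pvP3 : List Char := ['"', 'C', 'a', 't', 'e', 'g', 'o', 'r', 'y', '"']
abbrev pvR3 : List Char := ['c', 'a', 't', 'e', 'g', 'o', 'r', 'y']

-- natural recursion equivalent of PySem.Chars.replace (Python str.replace) for a nonempty pattern
def pvRepl (old new : List Char) : List Char → List Char
  | [] => []
  | c :: t => if old.isPrefixOf (c :: t) then new ++ pvRepl old new (t.drop (old.length - 1)) else c :: pvRepl old new t
  termination_by l => l.length
  decreasing_by all_goals (simp; try omega)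

lemma pvGo_eq (old new : List Char) (h : old ≠ []) :
    ∀ (fuel : Nat) (l acc : List Char), l.length ≤ fuel →
      PySem.Chars.replace.go old new fuel l acc = acc.reverse ++ pvRepl old new l := by
  intro fuel
  induction fuel with
  | zero =>
    intro l acc hl
    have hnil : l = [] := by cases l <;> simp_all
    subst hnil
    simp [PySem.Chars.replace.go, pvRepl]
  | succ n ih =>
    intro l acc hl
    cases l with
    | nil => simp [PySem.Chars.replace.go, pvRepl]
    | cons c t =>
      have hop : 0 < old.length := List.length_pos_iff.mpr h
      by_cases hp : old.isPrefixOf (c :: t)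
      · have hdrop : (c :: t).drop old.length = t.drop (old.length - 1) := by
          cases old with
          | nil => exact absurd rfl h
          | cons o os => simp
        have hlen : ((c :: t).drop old.length).length ≤ n := by
          simp only [List.length_drop]
          simp at hl
          simp only [List.length_cons]
          omega
        simp only [PySem.Chars.replace.go, hp, if_pos]
        rw [ih _ _ hlen, hdrop]
        simp [pvRepl, hp]
      · simp only [PySem.Chars.replace.go, hp]
        rw [ih t (c :: acc) (by simpa using hl)]
        simp [pvRepl, hp]

lemma pvReplace_eq (old new s : List Char) (h : old ≠ []) :
    PySem.Chars.replace s old new = pvRepl old new s := by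
  have : old.isEmpty = false := by cases old <;> simp_all
  simp [PySem.Chars.replace, this, pvGo_eq old new h s.length s [] le_rfl]

lemma pvRepl_cons_of_not_prefix (old new : List Char) (c : Char) (Y : List Char)
    (h : old.isPrefixOf (c :: Y) = false) :
    pvRepl old new (c :: Y) = c :: pvRepl old new Y := by
  simp [pvRepl, h]

-- a pattern starting with '"' steps over a character that is not '"'
lemma pvRepl_cons_noquote (o' new X : List Char) (c : Char) (hc : c ≠ '"') :
    pvRepl ('"' :: o') new (c :: X) = c :: pvRepl ('"' :: o') new X := by
  have : ('"' :: o').isPrefixOf (c :: X) = false := by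
    simp [List.isPrefixOf]
    intro hq
    exact absurd hq.symm hc
  simp [pvRepl, this]

-- … and hence over any quote-free block
lemma pvRepl_append_noquote (o' new u X : List Char) (hu : ∀ c ∈ u, c ≠ '"') :
    pvRepl ('"' :: o') new (u ++ X) = u ++ pvRepl ('"' :: o') new X := by
  induction u with
  | nil => simp
  | cons c u' ih =>
    have hc : c ≠ '"' := hu c (by simp)
    simp only [List.cons_append]
    rw [pvRepl_cons_noquote _ _ _ _ hc, ih (fun d hd => hu d (by simp [hd]))]

lemma pvRepl_match (old new X : List Char) (h : old ≠ []) :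
    pvRepl old new (old ++ X) = new ++ pvRepl old new X := by
  cases old with
  | nil => exact absurd rfl h
  | cons o os =>
    have hp : (o :: os).isPrefixOf ((o :: os) ++ X) = true :=
      List.isPrefixOf_iff_prefix.mpr (List.prefix_append _ _)
    have hd : (os ++ X).drop ((o :: os).length - 1) = X := by simp
    simp only [List.cons_append, pvRepl, List.length_cons]
    rw [show o :: (os ++ X) = (o :: os) ++ X by simp] at *
    simp

lemma pvTakePrefix {a b : List Char} (z : List Char) (h : a.isPrefixOf (b ++ z) = true) :
    (a.take b.length).isPrefixOf b = true := by
  have hp : a <+: b ++ z := List.isPrefixOf_iff_prefix.mp h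
  have h1 : a.take b.length <+: (b ++ z).take b.length := hp.take b.length
  rw [List.take_left] at h1
  exact List.isPrefixOf_iff_prefix.mpr h1

-- the replacement texts contain no '"', so a pass for one pattern cannot create a new
-- occurrence of (a front suffix of) another pattern
lemma pvNC (P R q : List Char)
    (hmis : ∀ i, 1 ≤ i → i < q.length → ((q.drop i).take R.length).isPrefixOf R = false) :
    ∀ (n : Nat) (X : List Char), X.length ≤ n → ∀ (i : Nat), 1 ≤ i →
    (q.drop i).isPrefixOf (pvRepl P R X) = true → (q.drop i).isPrefixOf X = true := by
  intro n
  induction n with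
  | zero =>
    intro X hX i hi hpre
    have hnil : X = [] := by cases X <;> simp_all
    subst hnil
    simpa [pvRepl] using hpre
  | succ n ih =>
    intro X hX i hi hpre
    by_cases hnil : q.drop i = []
    · rw [hnil]
      simp [List.isPrefixOf]
    · have hilt : i < q.length := by
        by_contra hge
        exact hnil (List.drop_eq_nil_iff.mpr (by omega))
      cases X with
      | nil => simpa [pvRepl] using hpre
      | cons c t =>
        by_cases hp : P.isPrefixOf (c :: t) = true
        · rw [show pvRepl P R (c :: t) = R ++ pvRepl P R (t.drop (P.length - 1)) by
            simp [pvRepl, hp]] at hpre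
          have := pvTakePrefix _ hpre
          rw [hmis i hi hilt] at this
          exact absurd this (by simp)
        · rw [show pvRepl P R (c :: t) = c :: pvRepl P R t by simp [pvRepl, hp]] at hpre
          obtain ⟨a, rest, har⟩ : ∃ a rest, q.drop i = a :: rest := by
            cases h' : q.drop i with
            | nil => exact absurd h' hnil
            | cons a rest => exact ⟨a, rest, rfl⟩
          have hrest : rest = q.drop (i + 1) := by rw [← List.tail_drop, har]; rfl
          rw [har] at hpre ⊢
          simp only [List.isPrefixOf, Bool.and_eq_true, beq_iff_eq] at hpre ⊢
          refine ⟨hpre.1, ?_⟩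
          rw [hrest] at hpre ⊢
          exact ih t (by simpa using Nat.le_of_succ_le_succ (by simpa using hX)) (i + 1)
            (by omega) hpre.2

lemma pvAltGo_noquote (c : Char) (t : List Char) (hc : c ≠ '"') :
    pvAltGo (c :: t) = c :: pvAltGo t := by
  simp [pvAltGo, hc]

lemma pvAltGo_m1 (t : List Char) (h1 : pvP1.isPrefixOf ('"' :: t) = true) :
    pvAltGo ('"' :: t) = pvR1 ++ pvAltGo (t.drop 12) := by
  simp [pvAltGo, h1]

lemma pvAltGo_m2 (t : List Char) (h1 : pvP1.isPrefixOf ('"' :: t) = false)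
    (h2 : pvP2.isPrefixOf ('"' :: t) = true) :
    pvAltGo ('"' :: t) = pvR2 ++ pvAltGo (t.drop 7) := by
  simp [pvAltGo, h1, h2]

lemma pvAltGo_m3 (t : List Char) (h1 : pvP1.isPrefixOf ('"' :: t) = false)
    (h2 : pvP2.isPrefixOf ('"' :: t) = false) (h3 : pvP3.isPrefixOf ('"' :: t) = true) :
    pvAltGo ('"' :: t) = pvR3 ++ pvAltGo (t.drop 9) := by
  simp [pvAltGo, h1, h2, h3]

lemma pvAltGo_nomatch (t : List Char) (h1 : pvP1.isPrefixOf ('"' :: t) = false)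
    (h2 : pvP2.isPrefixOf ('"' :: t) = false) (h3 : pvP3.isPrefixOf ('"' :: t) = false) :
    pvAltGo ('"' :: t) = '"' :: pvAltGo t := by
  simp [pvAltGo, h1, h2, h3]

-- the front-suffix mismatch conditions of pvNC for the three pattern/replacement pairs
lemma pvMis21 : ∀ i, 1 ≤ i → i < pvP2.length → ((pvP2.drop i).take pvR1.length).isPrefixOf pvR1 = false := by
  intro i hi hilt
  simp only [List.length_cons, List.length_nil] at hilt
  interval_cases i <;> decide

lemma pvMis31 : ∀ i, 1 ≤ i → i < pvP3.length → ((pvP3.drop i).take pvR1.length).isPrefixOf pvR1 = false := by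
  intro i hi hilt
  simp only [List.length_cons, List.length_nil] at hilt
  interval_cases i <;> decide

lemma pvMis32 : ∀ i, 1 ≤ i → i < pvP3.length → ((pvP3.drop i).take pvR2.length).isPrefixOf pvR2 = false := by
  intro i hi hilt
  simp only [List.length_cons, List.length_nil] at hilt
  interval_cases i <;> decide

set_option maxRecDepth 8192 in
lemma pvMain : ∀ (n : Nat) (s : List Char), s.length ≤ n →
    (∀ b ∈ pvBad, ¬ (b.toList <:+: s)) →
    pvRepl pvP3 pvR3 (pvRepl pvP2 pvR2 (pvRepl pvP1 pvR1 s)) = pvAltGo s := by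
  intro n
  induction n with
  | zero =>
    intro s hs _
    have hnil : s = [] := by cases s <;> simp_all
    subst hnil
    simp [pvRepl, pvAltGo]
  | succ n ih =>
    intro s hs hno
    cases s with
    | nil => simp [pvRepl, pvAltGo]
    | cons c t =>
      have hnot : ∀ b ∈ pvBad, ¬ (b.toList <:+: t) := by
        intro b hb hinf
        have hsuf : t <:+: c :: t := List.IsSuffix.isInfix ⟨[c], rfl⟩
        exact hno b hb (List.IsInfix.trans hinf hsuf)
      have hlt : t.length ≤ n := by simpa using hs
      by_cases hc : c = '"'
      case neg =>
        rw [pvRepl_cons_noquote _ _ _ _ hc, pvRepl_cons_noquote _ _ _ _ hc,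
          pvRepl_cons_noquote _ _ _ _ hc, pvAltGo_noquote _ _ hc]
        exact congrArg (c :: ·) (ih t hlt hnot)
      case pos =>
        subst hc
        by_cases h1 : pvP1.isPrefixOf ('"' :: t) = true
        · obtain ⟨w, hw⟩ := List.isPrefixOf_iff_prefix.mp h1
          have hlw : w.length ≤ n := by
            have := congrArg List.length hw
            simp at this
            omega
          have hnow : ∀ b ∈ pvBad, ¬ (b.toList <:+: w) := by
            intro b hb hinf
            have hsuf : w <:+: '"' :: t := List.IsSuffix.isInfix ⟨pvP1, hw⟩
            exact hno b hb (List.IsInfix.trans hinf hsuf)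
          have ht : t = ['D', 'e', 's', 'c', 'r', 'i', 'p', 't', 'i', 'o', 'n', '"'] ++ w := by
            have h' : ('"' : Char) :: (['D', 'e', 's', 'c', 'r', 'i', 'p', 't', 'i', 'o', 'n', '"'] ++ w)
                = '"' :: t := hw
            exact (List.cons_injective h').symm
          have hdw : t.drop 12 = w := by rw [ht]; rfl
          rw [pvAltGo_m1 t h1, hdw, ← hw,
            pvRepl_match pvP1 pvR1 w (by decide),
            pvRepl_append_noquote ['V', 'e', 'n', 'd', 'o', 'r', '"'] pvR2 pvR1 _ (by intro c hc; fin_cases hc <;> simp),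
            pvRepl_append_noquote ['C', 'a', 't', 'e', 'g', 'o', 'r', 'y', '"'] pvR3 pvR1 _ (by intro c hc; fin_cases hc <;> simp)]
          exact congrArg (pvR1 ++ ·) (ih w hlw hnow)
        · have h1f : pvP1.isPrefixOf ('"' :: t) = false := by
            simpa only [Bool.not_eq_true] using h1
          by_cases h2 : pvP2.isPrefixOf ('"' :: t) = true
          · obtain ⟨w, hw⟩ := List.isPrefixOf_iff_prefix.mp h2
            have hlw : w.length ≤ n := by
              have := congrArg List.length hw
              simp at this
              omega
            have hnow : ∀ b ∈ pvBad, ¬ (b.toList <:+: w) := by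
              intro b hb hinf
              have hsuf : w <:+: '"' :: t := List.IsSuffix.isInfix ⟨pvP2, hw⟩
              exact hno b hb (List.IsInfix.trans hinf hsuf)
            have ht : t = ['V', 'e', 'n', 'd', 'o', 'r'] ++ ('"' :: w) := by
              have h' : ('"' : Char) :: (['V', 'e', 'n', 'd', 'o', 'r'] ++ ('"' :: w))
                  = '"' :: t := hw
              exact (List.cons_injective h').symm
            have hdw : t.drop 7 = w := by rw [ht]; rfl
            have hb1 := hno "\"Vendor\"Description\"" (by simp [pvBad])
            have hn1 : pvP1.isPrefixOf ('"' :: w) = false := by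
              by_contra hcon
              rw [Bool.not_eq_false] at hcon
              obtain ⟨v, hv⟩ := List.isPrefixOf_iff_prefix.mp hcon
              apply hb1
              refine ⟨[], v, ?_⟩
              rw [show ("\"Vendor\"Description\"".toList)
                  = ['"', 'V', 'e', 'n', 'd', 'o', 'r'] ++ pvP1 from by decide, ← hw]
              have hwv : w = ['D', 'e', 's', 'c', 'r', 'i', 'p', 't', 'i', 'o', 'n', '"'] ++ v := by
                have h' : ('"' : Char) :: (['D', 'e', 's', 'c', 'r', 'i', 'p', 't', 'i', 'o', 'n', '"'] ++ v)
                    = '"' :: w := hv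
                exact (List.cons_injective h').symm
              rw [hwv]
              simp
            have e1 : pvRepl pvP1 pvR1 ('"' :: t) = pvP2 ++ pvRepl pvP1 pvR1 w := by
              rw [pvRepl_cons_of_not_prefix pvP1 pvR1 _ _ h1f, ht,
                pvRepl_append_noquote ['D', 'e', 's', 'c', 'r', 'i', 'p', 't', 'i', 'o', 'n', '"']
                  pvR1 ['V', 'e', 'n', 'd', 'o', 'r'] _ (by intro c hc; fin_cases hc <;> simp),
                pvRepl_cons_of_not_prefix pvP1 pvR1 _ _ hn1]
              rfl
            rw [pvAltGo_m2 t h1f h2, hdw, e1,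
              pvRepl_match pvP2 pvR2 _ (by decide),
              pvRepl_append_noquote ['C', 'a', 't', 'e', 'g', 'o', 'r', 'y', '"'] pvR3 pvR2 _ (by intro c hc; fin_cases hc <;> simp)]
            exact congrArg (pvR2 ++ ·) (ih w hlw hnow)
          · have h2f : pvP2.isPrefixOf ('"' :: t) = false := by
              simpa only [Bool.not_eq_true] using h2
            by_cases h3 : pvP3.isPrefixOf ('"' :: t) = true
            · obtain ⟨w, hw⟩ := List.isPrefixOf_iff_prefix.mp h3
              have hlw : w.length ≤ n := by
                have := congrArg List.length hw
                simp at this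
                omega
              have hnow : ∀ b ∈ pvBad, ¬ (b.toList <:+: w) := by
                intro b hb hinf
                have hsuf : w <:+: '"' :: t := List.IsSuffix.isInfix ⟨pvP3, hw⟩
                exact hno b hb (List.IsInfix.trans hinf hsuf)
              have ht : t = ['C', 'a', 't', 'e', 'g', 'o', 'r', 'y'] ++ ('"' :: w) := by
                have h' : ('"' : Char) :: (['C', 'a', 't', 'e', 'g', 'o', 'r', 'y'] ++ ('"' :: w))
                    = '"' :: t := hw
                exact (List.cons_injective h').symm
              have hdw : t.drop 9 = w := by rw [ht]; rfl
              have hb2 := hno "\"Category\"Description\"" (by simp [pvBad])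
              have hb3 := hno "\"Category\"Vendor\"" (by simp [pvBad])
              have hn1 : pvP1.isPrefixOf ('"' :: w) = false := by
                by_contra hcon
                rw [Bool.not_eq_false] at hcon
                obtain ⟨v, hv⟩ := List.isPrefixOf_iff_prefix.mp hcon
                apply hb2
                refine ⟨[], v, ?_⟩
                rw [show ("\"Category\"Description\"".toList)
                    = ['"', 'C', 'a', 't', 'e', 'g', 'o', 'r', 'y'] ++ pvP1 from by decide, ← hw]
                have hwv : w = ['D', 'e', 's', 'c', 'r', 'i', 'p', 't', 'i', 'o', 'n', '"'] ++ v := by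
                  have h' : ('"' : Char) :: (['D', 'e', 's', 'c', 'r', 'i', 'p', 't', 'i', 'o', 'n', '"'] ++ v)
                      = '"' :: w := hv
                  exact (List.cons_injective h').symm
                rw [hwv]
                simp
              have e1 : pvRepl pvP1 pvR1 ('"' :: t) = pvP3 ++ pvRepl pvP1 pvR1 w := by
                rw [pvRepl_cons_of_not_prefix pvP1 pvR1 _ _ h1f, ht,
                  pvRepl_append_noquote ['D', 'e', 's', 'c', 'r', 'i', 'p', 't', 'i', 'o', 'n', '"']
                    pvR1 ['C', 'a', 't', 'e', 'g', 'o', 'r', 'y'] _ (by intro c hc; fin_cases hc <;> simp),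
                  pvRepl_cons_of_not_prefix pvP1 pvR1 _ _ hn1]
                rfl
              have hn2 : pvP2.isPrefixOf ('"' :: pvRepl pvP1 pvR1 w) = false := by
                by_contra hcon
                rw [Bool.not_eq_false] at hcon
                have hcon' : (['V', 'e', 'n', 'd', 'o', 'r', '"'] : List Char).isPrefixOf
                    (pvRepl pvP1 pvR1 w) = true := by
                  simpa only [List.isPrefixOf, beq_self_eq_true, Bool.true_and] using hcon
                have hwpre : (['V', 'e', 'n', 'd', 'o', 'r', '"'] : List Char).isPrefixOf w = true :=
                  pvNC pvP1 pvR1 pvP2 pvMis21 w.length w le_rfl 1 le_rfl hcon'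
                have hqpre : pvP2.isPrefixOf ('"' :: w) = true := by
                  simpa only [List.isPrefixOf, beq_self_eq_true, Bool.true_and] using hwpre
                obtain ⟨v, hv⟩ := List.isPrefixOf_iff_prefix.mp hqpre
                apply hb3
                refine ⟨[], v, ?_⟩
                rw [show ("\"Category\"Vendor\"".toList)
                    = ['"', 'C', 'a', 't', 'e', 'g', 'o', 'r', 'y'] ++ pvP2 from by decide, ← hw]
                have hwv : w = ['V', 'e', 'n', 'd', 'o', 'r', '"'] ++ v := by
                  have h' : ('"' : Char) :: (['V', 'e', 'n', 'd', 'o', 'r', '"'] ++ v)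
                      = '"' :: w := hv
                  exact (List.cons_injective h').symm
                rw [hwv]
                simp
              have hP23 : pvP2.isPrefixOf
                  ('"' :: (['C', 'a', 't', 'e', 'g', 'o', 'r', 'y'] ++ ('"' :: pvRepl pvP1 pvR1 w)))
                  = false := by
                by_contra hcon
                rw [Bool.not_eq_false] at hcon
                have hcon2 : pvP2.isPrefixOf (pvP3 ++ pvRepl pvP1 pvR1 w) = true := hcon
                exact absurd (pvTakePrefix _ hcon2) (by decide)
              have e2 : pvRepl pvP2 pvR2 (pvP3 ++ pvRepl pvP1 pvR1 w)
                  = pvP3 ++ pvRepl pvP2 pvR2 (pvRepl pvP1 pvR1 w) := by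
                show pvRepl pvP2 pvR2
                    ('"' :: (['C', 'a', 't', 'e', 'g', 'o', 'r', 'y'] ++ ('"' :: pvRepl pvP1 pvR1 w)))
                    = pvP3 ++ pvRepl pvP2 pvR2 (pvRepl pvP1 pvR1 w)
                rw [pvRepl_cons_of_not_prefix pvP2 pvR2 _ _ hP23,
                  pvRepl_append_noquote ['V', 'e', 'n', 'd', 'o', 'r', '"']
                    pvR2 ['C', 'a', 't', 'e', 'g', 'o', 'r', 'y'] _ (by intro c hc; fin_cases hc <;> simp),
                  pvRepl_cons_of_not_prefix pvP2 pvR2 _ _ hn2]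
                rfl
              rw [pvAltGo_m3 t h1f h2f h3, hdw, e1, e2,
                pvRepl_match pvP3 pvR3 _ (by decide)]
              exact congrArg (pvR3 ++ ·) (ih w hlw hnow)
            · have h3f : pvP3.isPrefixOf ('"' :: t) = false := by
                simpa only [Bool.not_eq_true] using h3
              rw [pvRepl_cons_of_not_prefix pvP1 pvR1 _ _ h1f]
              have hA : pvP2.isPrefixOf ('"' :: pvRepl pvP1 pvR1 t) = false := by
                by_contra hcon
                rw [Bool.not_eq_false] at hcon
                have hcon' : (['V', 'e', 'n', 'd', 'o', 'r', '"'] : List Char).isPrefixOf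
                    (pvRepl pvP1 pvR1 t) = true := by
                  simpa only [List.isPrefixOf, beq_self_eq_true, Bool.true_and] using hcon
                have htpre : (['V', 'e', 'n', 'd', 'o', 'r', '"'] : List Char).isPrefixOf t = true :=
                  pvNC pvP1 pvR1 pvP2 pvMis21 t.length t le_rfl 1 le_rfl hcon'
                apply h2
                simpa only [List.isPrefixOf, beq_self_eq_true, Bool.true_and] using htpre
              rw [pvRepl_cons_of_not_prefix pvP2 pvR2 _ _ hA]
              have hB : pvP3.isPrefixOf ('"' :: pvRepl pvP2 pvR2 (pvRepl pvP1 pvR1 t)) = false := by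
                by_contra hcon
                rw [Bool.not_eq_false] at hcon
                have hcon' : (['C', 'a', 't', 'e', 'g', 'o', 'r', 'y', '"'] : List Char).isPrefixOf
                    (pvRepl pvP2 pvR2 (pvRepl pvP1 pvR1 t)) = true := by
                  simpa only [List.isPrefixOf, beq_self_eq_true, Bool.true_and] using hcon
                have h32 : (['C', 'a', 't', 'e', 'g', 'o', 'r', 'y', '"'] : List Char).isPrefixOf
                    (pvRepl pvP1 pvR1 t) = true :=
                  pvNC pvP2 pvR2 pvP3 pvMis32 (pvRepl pvP1 pvR1 t).length _ le_rfl 1 le_rfl hcon'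
                have h31 : (['C', 'a', 't', 'e', 'g', 'o', 'r', 'y', '"'] : List Char).isPrefixOf t = true :=
                  pvNC pvP1 pvR1 pvP3 pvMis31 t.length t le_rfl 1 le_rfl h32
                apply h3
                simpa only [List.isPrefixOf, beq_self_eq_true, Bool.true_and] using h31
              rw [pvRepl_cons_of_not_prefix pvP3 pvR3 _ _ hB, pvAltGo_nomatch t h1f h2f h3f]
              exact congrArg ('"' :: ·) (ih t hlt hnot)

-- ===== VERDICT (by name: the statement is the Claim_ definition above) =====
theorem normalize_sql_spec : Claim_equal_normalize_sql := by
  intro sql hdom hpre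
  unfold Spec_normalize_sql normalize_sql normalize_sql_alt
  simp only [List.foldl]
  have hbads : ∀ b ∈ pvBad, ¬ (b.toList <:+: sql.toList) := by
    intro b hb hinf
    have h1 : PySem.Str.isIn b sql = true := (PySem.Str.isIn_iff_infix b sql).mpr hinf
    rw [hpre b hb] at h1
    exact Bool.false_ne_true h1
  have hl : (PySem.Str.replace (PySem.Str.replace (PySem.Str.replace sql "\"Description\"" "description")
      "\"Vendor\"" "vendor") "\"Category\"" "category").toList = pvAltGo sql.toList := by
    simp only [PySem.Str.toList_replace]
    rw [pvReplace_eq _ _ _ (by decide), pvReplace_eq _ _ _ (by decide), pvReplace_eq _ _ _ (by decide),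
      show "\"Description\"".toList = pvP1 from by decide,
      show "description".toList = pvR1 from by decide,
      show "\"Vendor\"".toList = pvP2 from by decide,
      show "vendor".toList = pvR2 from by decide,
      show "\"Category\"".toList = pvP3 from by decide,
      show "category".toList = pvR3 from by decide]
    exact pvMain sql.toList.length sql.toList le_rfl hbads
  rw [← String.ofList_toList (s := PySem.Str.replace (PySem.Str.replace (PySem.Str.replace sql
      "\"Description\"" "description") "\"Vendor\"" "vendor") "\"Category\"" "category"), hl]
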